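-- pv_equiv track=rewrite | github.com/ZraryZU/python- | T2.py | bracket_matching
-- ===== SOURCE A (Python) =====
-- def bracket_matching(input):
--     #用栈进行括号匹配，并记录匹配失败的下标
--     output=[' ' for _ in range(len(input))]
--     i = 0
--     bracket_stack = []
--     while(i < len(input)):
--         c = input[i]
--         if (c != '(' and c != ')') :
--             output[i] = ' '
--         elif (c == '('):
--             bracket_stack.append(i)
--         elif (c == ')'):
--            if len(bracket_stack) == 0:
--                output[i] = '?'
--            else:
--                output[bracket_stack.pop()] = ' '
--         i+=1
--     while(len(bracket_stack)):
--         output[bracket_stack.pop()] = 'x'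
--     output_str=''
--     for c in output:
--         output_str += c
--     return output_str
-- ===== SOURCE B (Python) =====
-- def bracket_matching(input):
--     # Two counter scans (left-to-right for '?', right-to-left for 'x') instead of a stack.
--     fmarks = []
--     open_cnt = 0
--     for c in input:
--         if c == '(':
--             open_cnt += 1
--             fmarks.append(' ')
--         elif c == ')':
--             if open_cnt:
--                 open_cnt -= 1
--                 fmarks.append(' ')
--             else:
--                 fmarks.append('?')
--         else:
--             fmarks.append(' ')
--     bmarks = []
--     close_cnt = 0
--     for c in reversed(input):
--         if c == ')':
--             close_cnt += 1
--             bmarks.append(' ')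
--         elif c == '(':
--             if close_cnt:
--                 close_cnt -= 1
--                 bmarks.append(' ')
--             else:
--                 bmarks.append('x')
--         else:
--             bmarks.append(' ')
--     bmarks.reverse()
--     return ''.join(b if f == ' ' else f for f, b in zip(fmarks, bmarks))
-- ===== Notes on version B (the rewrite author's own statement) =====
-- stated objective: alternative
-- what changed: Replaces A's explicit stack of '(' indices plus a drain loop and in-place output array by two counter-only scans: a left-to-right open-counter pass marking unmatched ')' with '?' and a right-to-left close-counter pass marking unmatched '(' with 'x', merged by zip.
import Mathlib
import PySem

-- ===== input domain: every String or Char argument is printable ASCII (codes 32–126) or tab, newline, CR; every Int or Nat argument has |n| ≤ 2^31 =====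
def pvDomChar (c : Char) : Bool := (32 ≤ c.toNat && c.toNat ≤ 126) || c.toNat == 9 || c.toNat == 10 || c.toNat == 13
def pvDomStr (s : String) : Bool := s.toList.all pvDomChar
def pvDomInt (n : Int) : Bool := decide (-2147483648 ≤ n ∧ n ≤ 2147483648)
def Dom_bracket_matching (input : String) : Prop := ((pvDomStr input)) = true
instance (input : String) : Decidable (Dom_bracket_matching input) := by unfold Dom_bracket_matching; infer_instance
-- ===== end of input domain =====

-- B replaces A's index stack by two counter scans (left-to-right for '?', right-to-left for 'x'); objective: alternative algorithm, same cost.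

-- ===== PORT A =====
-- while i < len(input): ... (stack of indices; push '(' index, pop on ')', '?' on unmatched ')')
def bmLoopA : List Char → Nat → List Char → List Nat → List Char × List Nat
  | [], _, out, st => (out, st)
  | c :: rest, i, out, st =>
    if c ≠ '(' ∧ c ≠ ')' then bmLoopA rest (i+1) (out.set i ' ') st
    else if c = '(' then bmLoopA rest (i+1) out (i :: st)
    else match st with
      | [] => bmLoopA rest (i+1) (out.set i '?') []
      | j :: st' => bmLoopA rest (i+1) (out.set j ' ') st'

-- while len(bracket_stack): output[bracket_stack.pop()] = 'x'
def bmDrain : List Nat → List Char → List Char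
  | [], out => out
  | j :: st, out => bmDrain st (out.set j 'x')

def bracket_matching (input : String) : String :=
  let cs := input.toList
  let p := bmLoopA cs 0 (List.replicate cs.length ' ') []
  let out := bmDrain p.2 p.1
  out.foldl (fun s c => s.push c) ""

-- ===== PORT B =====
-- forward scan: open counter, mark unmatched ')' with '?'
def bmFPass : List Char → Nat → List Char
  | [], _ => []
  | c :: t, o =>
    if c = '(' then ' ' :: bmFPass t (o+1)
    else if c = ')' then (if 0 < o then ' ' :: bmFPass t (o-1) else '?' :: bmFPass t o)
    else ' ' :: bmFPass t o

-- backward scan (run over the reversed list): close counter, mark unmatched '(' with 'x'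
def bmBPass : List Char → Nat → List Char
  | [], _ => []
  | c :: t, r =>
    if c = ')' then ' ' :: bmBPass t (r+1)
    else if c = '(' then (if 0 < r then ' ' :: bmBPass t (r-1) else 'x' :: bmBPass t r)
    else ' ' :: bmBPass t r

def bracket_matching_alt (input : String) : String :=
  let cs := input.toList
  let f := bmFPass cs 0
  let b := (bmBPass cs.reverse 0).reverse
  String.ofList ((f.zip b).map (fun p => if p.1 = ' ' then p.2 else p.1))

-- ===== PRECONDITION & SPEC =====
def Spec_bracket_matching (input : String) (out : String) : Prop := out = bracket_matching_alt input
instance (input : String) (out : String) : Decidable (Spec_bracket_matching input out) := by unfold Spec_bracket_matching; infer_instance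

-- ===== CLAIM (what is proved, stated in full; the proofs are below) =====
def Claim_equal_bracket_matching : Prop := ∀ (input : String), Dom_bracket_matching input → Spec_bracket_matching input (bracket_matching input)

-- ===== LEMMAS AND PROOFS =====

-- counter update of the backward scan
def bmStep (c : Char) (r : Nat) : Nat := if c = ')' then r + 1 else if c = '(' then r - 1 else r

-- counter value after a forward run of bmBPass
def bmFcnt : List Char → Nat → Nat
  | [], r => r
  | c :: t, r => bmFcnt t (bmStep c r)

-- number of right-unmatched ')' of a list (counter of the backward scan at its left end)
def bmRc : List Char → Nat
  | [] => 0
  | c :: t => bmStep c (bmRc t)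

def bmMark (c : Char) (r : Nat) : Char :=
  if c = ')' then ' ' else if c = '(' then (if 0 < r then ' ' else 'x') else ' '

-- merged marks: the output list both programs produce, by one recursion
def bmMM : List Char → Nat → List Char
  | [], _ => []
  | c :: t, o =>
    if c = '(' then (if bmRc t = 0 then 'x' else ' ') :: bmMM t (o+1)
    else if c = ')' then (if 0 < o then ' ' :: bmMM t (o-1) else '?' :: bmMM t o)
    else ' ' :: bmMM t o

-- write ms into out starting at index i
def bmWF : Nat → List Char → List Char → List Char
  | _, [], out => out
  | i, m :: ms, out => bmWF (i+1) ms (out.set i m)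

-- apply the future pops (k of them) and the final drain to the stack positions
def bmAS : List Nat → Nat → List Char → List Char
  | [], _, out => out
  | j :: st, k, out => if 0 < k then bmAS st (k-1) (out.set j ' ') else bmAS st k (out.set j 'x')

theorem bmLoopA_other {c : Char} (rest : List Char) (i : Nat) (out : List Char) (st : List Nat)
    (h1 : c ≠ '(') (h2 : c ≠ ')') :
    bmLoopA (c :: rest) i out st = bmLoopA rest (i+1) (out.set i ' ') st := by
  simp [bmLoopA, h1, h2]

theorem bmLoopA_open (rest : List Char) (i : Nat) (out : List Char) (st : List Nat) :
    bmLoopA ('(' :: rest) i out st = bmLoopA rest (i+1) out (i :: st) := by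
  simp [bmLoopA]

theorem bmLoopA_close_nil (rest : List Char) (i : Nat) (out : List Char) :
    bmLoopA (')' :: rest) i out [] = bmLoopA rest (i+1) (out.set i '?') [] := by
  simp [bmLoopA]

theorem bmLoopA_close_cons (rest : List Char) (i : Nat) (out : List Char) (j : Nat) (st : List Nat) :
    bmLoopA (')' :: rest) i out (j :: st) = bmLoopA rest (i+1) (out.set j ' ') st := by
  simp [bmLoopA]

theorem bmDrain_eq_as (st : List Nat) (out : List Char) : bmDrain st out = bmAS st 0 out := by
  induction st generalizing out with
  | nil => rfl
  | cons j st ih => simp [bmDrain, bmAS, ih]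

theorem bmSet_id {l : List Char} {i : Nat} {a : Char} (h : ∀ (h : i < l.length), l[i] = a) :
    l.set i a = l := by
  apply List.ext_getElem (by simp)
  intro k hk hk'
  simp only [List.getElem_set]
  split
  · next he => subst he; exact (h hk').symm
  · rfl

theorem bmWF_set_lt (ms : List Char) (i j : Nat) (a : Char) (out : List Char) (h : j < i) :
    bmWF i ms (out.set j a) = (bmWF i ms out).set j a := by
  induction ms generalizing i out with
  | nil => rfl
  | cons m ms ih =>
    simp only [bmWF]
    rw [List.set_comm _ _ (Nat.ne_of_lt h), ih _ _ (Nat.lt_succ_of_lt h)]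

theorem bmFcnt_append (xs : List Char) (c : Char) (r : Nat) :
    bmFcnt (xs ++ [c]) r = bmStep c (bmFcnt xs r) := by
  induction xs generalizing r with
  | nil => rfl
  | cons x xs ih => simp [bmFcnt, ih]

theorem bmRc_eq (t : List Char) : bmRc t = bmFcnt t.reverse 0 := by
  induction t with
  | nil => rfl
  | cons c t ih => simp [bmRc, List.reverse_cons, bmFcnt_append, ih]

theorem bmBPass_append (xs : List Char) (c : Char) (r : Nat) :
    bmBPass (xs ++ [c]) r = bmBPass xs r ++ [bmMark c (bmFcnt xs r)] := by
  induction xs generalizing r with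
  | nil =>
    simp only [List.nil_append, bmBPass, bmFcnt, bmMark]
    by_cases h1 : c = ')' <;> by_cases h2 : c = '(' <;> by_cases h3 : 0 < r <;>
      simp [h1, h2, h3, bmBPass]
  | cons x xs ih =>
    simp only [List.cons_append, bmBPass, bmFcnt, bmStep]
    by_cases h1 : x = ')'
    · simp [h1, ih]
    · by_cases h2 : x = '('
      · by_cases h3 : 0 < r
        · simp [h1, h2, h3, ih]
        · have hr : r = 0 := by omega
          subst hr
          simp [h1, h2, ih]
      · simp [h1, h2, ih]

theorem bmBwm_cons (c : Char) (t : List Char) :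
    (bmBPass (c :: t).reverse 0).reverse = bmMark c (bmRc t) :: (bmBPass t.reverse 0).reverse := by
  rw [List.reverse_cons, bmBPass_append, bmRc_eq]
  simp

theorem bmMM_eq_zip (cs : List Char) (o : Nat) :
    bmMM cs o = ((bmFPass cs o).zip ((bmBPass cs.reverse 0).reverse)).map
      (fun p => if p.1 = ' ' then p.2 else p.1) := by
  induction cs generalizing o with
  | nil => rfl
  | cons c t ih =>
    rw [bmBwm_cons]
    simp only [bmMM, bmFPass, bmMark]
    by_cases h1 : c = '(' <;> by_cases h2 : c = ')'
    · simp [h1] at h2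
    · by_cases h3 : bmRc t = 0 <;>
        simp [h1, h2, h3, ih, Nat.pos_iff_ne_zero]
    · by_cases h3 : 0 < o <;> simp [h1, h2, h3, ih]
    · simp [h1, h2, ih]

theorem bmMainA (rest : List Char) (i : Nat) (out : List Char) (st : List Nat)
    (hst : ∀ j ∈ st, j < i)
    (hout : ∀ k (h : k < out.length), i ≤ k → out[k] = ' ') :
    bmDrain (bmLoopA rest i out st).2 (bmLoopA rest i out st).1
      = bmAS st (bmRc rest) (bmWF i (bmMM rest st.length) out) := by
  induction rest generalizing i out st with
  | nil =>
    simp only [bmLoopA, bmMM, bmWF, bmRc]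
    exact bmDrain_eq_as st out
  | cons c rest ih =>
    by_cases h1 : c = '(' <;> by_cases h2 : c = ')'
    · simp [h1] at h2
    · -- c = '('
      subst h1
      rw [bmLoopA_open]
      rw [ih (i+1) out (i :: st)
        (by intro j hj
            rcases List.mem_cons.mp hj with h | h
            · omega
            · exact Nat.lt_succ_of_lt (hst _ h))
        (fun k hk hik => hout k hk (Nat.le_of_succ_le hik))]
      have hrc : bmRc ('(' :: rest) = bmRc rest - 1 := by simp [bmRc, bmStep]
      have hmm : bmMM ('(' :: rest) st.length
          = (if bmRc rest = 0 then 'x' else ' ') :: bmMM rest (st.length + 1) := by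
        simp [bmMM]
      rw [hrc, hmm]
      simp only [bmWF, List.length_cons]
      rw [bmWF_set_lt _ _ _ _ _ (Nat.lt_succ_self i)]
      by_cases h3 : bmRc rest = 0
      · simp [bmAS, h3]
      · simp only [bmAS, if_pos (Nat.pos_of_ne_zero h3)]
        simp [h3]
    · -- c = ')'
      subst h2
      cases st with
      | nil =>
        rw [bmLoopA_close_nil]
        rw [ih (i+1) (out.set i '?') []
          (by intro j hj; simp at hj)
          (by intro k hk hik
              have hki : i ≠ k := by omega
              simp only [List.getElem_set, if_neg hki]
              exact hout k (by simpa using hk) (Nat.le_of_succ_le hik))]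
        have hmm : bmMM (')' :: rest) (List.length ([] : List Nat))
            = '?' :: bmMM rest 0 := by simp [bmMM]
        rw [hmm]
        simp [bmAS, bmWF]
      | cons j st' =>
        rw [bmLoopA_close_cons]
        have hji : j < i := hst j (List.mem_cons_self ..)
        rw [ih (i+1) (out.set j ' ') st'
          (by intro x hx; exact Nat.lt_succ_of_lt (hst x (List.mem_cons_of_mem _ hx)))
          (by intro k hk hik
              have hjk : j ≠ k := by omega
              simp only [List.getElem_set, if_neg hjk]
              exact hout k (by simpa using hk) (Nat.le_of_succ_le hik))]
        have hrc : bmRc (')' :: rest) = bmRc rest + 1 := by simp [bmRc, bmStep]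
        have hmm : bmMM (')' :: rest) (j :: st').length
            = ' ' :: bmMM rest st'.length := by
          simp [bmMM]
        rw [hrc, hmm]
        simp only [bmWF]
        have hset : out.set i ' ' = out := bmSet_id (fun h => hout i h (Nat.le_refl i))
        rw [hset, bmWF_set_lt _ _ _ _ _ (Nat.lt_succ_of_lt hji)]
        simp [bmAS]
    · -- other char
      rw [bmLoopA_other _ _ _ _ h1 h2]
      rw [ih (i+1) (out.set i ' ') st
        (by intro x hx; exact Nat.lt_succ_of_lt (hst x hx))
        (by intro k hk hik
            have hik' : i ≠ k := by omega
            simp only [List.getElem_set, if_neg hik']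
            exact hout k (by simpa using hk) (Nat.le_of_succ_le hik))]
      have hrc : bmRc (c :: rest) = bmRc rest := by simp [bmRc, bmStep, h1, h2]
      have hmm : bmMM (c :: rest) st.length = ' ' :: bmMM rest st.length := by
        simp [bmMM, h1, h2]
      rw [hrc, hmm]
      simp only [bmWF]

theorem bmMM_length (cs : List Char) (o : Nat) : (bmMM cs o).length = cs.length := by
  induction cs generalizing o with
  | nil => rfl
  | cons c t ih =>
    by_cases h1 : c = '('
    · simp [bmMM, h1, ih]
    · by_cases h2 : c = ')'
      · by_cases h3 : 0 < o <;> simp [bmMM, h1, h2, h3, ih]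
      · simp [bmMM, h1, h2, ih]

theorem bmWF_full (ms : List Char) (i : Nat) (out : List Char) (h : i + ms.length = out.length) :
    bmWF i ms out = out.take i ++ ms := by
  induction ms generalizing i out with
  | nil =>
    simp only [List.length_nil, Nat.add_zero] at h
    simp [bmWF, List.take_of_length_le (Nat.le_of_eq h.symm)]
  | cons m ms ih =>
    have hi : i < out.length := by simp at h; omega
    simp only [bmWF]
    rw [ih (i+1) (out.set i m) (by simp at h ⊢; omega)]
    have hts : (out.set i m).take (i+1) = out.take i ++ [m] := by
      apply List.ext_getElem
      · simp; omega
      · intro k hk hk'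
        simp only [List.length_take, List.length_set] at hk
        rw [List.getElem_take, List.getElem_set]
        rcases Nat.lt_or_ge k i with hlt | hge
        · rw [List.getElem_append_left (by simp; omega)]
          simp [Nat.ne_of_gt hlt, List.getElem_take]
        · have hki : k = i := by omega
          subst hki
          have hlen : (out.take k).length = k := by
            simp
            omega
          rw [if_pos rfl, List.getElem_append_right (Nat.le_of_eq hlen)]
          simp [hlen]
    simp [hts]

theorem bmFoldl_push (l acc : List Char) :
    l.foldl (fun s c => s.push c) (String.ofList acc) = String.ofList (acc ++ l) := by
  induction l generalizing acc with
  | nil => simp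
  | cons c t ih =>
    simp only [List.foldl]
    have hp : (String.ofList acc).push c = String.ofList (acc ++ [c]) := by
      apply String.toList_inj.mp
      simp [String.toList_push]
    rw [hp, ih]
    simp

-- ===== VERDICT (by name: the statement is the Claim_ definition above) =====
theorem bracket_matching_spec : Claim_equal_bracket_matching := by
  intro input _
  unfold Spec_bracket_matching
  simp only [bracket_matching, bracket_matching_alt]
  rw [← bmMM_eq_zip input.toList 0]
  have hmain := bmMainA input.toList 0 (List.replicate input.toList.length ' ') []
    (by intro j hj; simp at hj)
    (by intro k hk _; simp [List.getElem_replicate])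
  simp only [List.length_nil] at hmain
  rw [hmain, bmWF_full _ _ _ (by simp [bmMM_length])]
  simp only [List.take_zero, List.nil_append, bmAS]
  have hempty : ("" : String) = String.ofList [] := by
    apply String.toList_inj.mp
    simp
  rw [hempty, bmFoldl_push]
  simp
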